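-- pv_equiv track=rewrite | github.com/mrdrano/Multiplication-of-Polynomial-Texts | main.py | retrace
-- ===== SOURCE A (Python) =====
-- def retrace(ddos, raw):
--
--     fic = []
--     for i in range(len(raw)):
--         if ("^" in raw[i]):
--             fic.append(1)
--         else:
--             fic.append(0)
--
--     lastt = []  # fic =  [1, 1, 0, 1, 1, 0]
--
--     h = 0  # raw =  ['XX^2', '-XY^2', '+XZ', '+YX^2', '-YY^2', '+YZ']
--     for i in range(len(fic)):  # ddos = ['X^3', '-XY^2', '+YX^2', '-Y^3']  0-3
--         if (fic[i] == 1):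
--             lastt.append(ddos[h])
--             h += 1
--
--         if (fic[i] == 0):
--             lastt.append(raw[i])
--
--     return lastt
-- ===== SOURCE B (Python) =====
-- def retrace(ddos, raw):
--     out = []
--     h = sum(1 for x in raw if "^" in x)
--     for x in reversed(raw):
--         if "^" in x:
--             h -= 1
--             out.append(ddos[h])
--         else:
--             out.append(x)
--     out.reverse()
--     return out
-- ===== Notes on version B (the rewrite author's own statement) =====
-- stated objective: alternative
-- what changed: B precomputes the caret count and builds the output back-to-front over reversed(raw), decrementing an index into ddos, then reverses once at the end, instead of A's 0/1 flag-list pass plus a forward interleaving loop with an incrementing counter.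
import Mathlib
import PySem

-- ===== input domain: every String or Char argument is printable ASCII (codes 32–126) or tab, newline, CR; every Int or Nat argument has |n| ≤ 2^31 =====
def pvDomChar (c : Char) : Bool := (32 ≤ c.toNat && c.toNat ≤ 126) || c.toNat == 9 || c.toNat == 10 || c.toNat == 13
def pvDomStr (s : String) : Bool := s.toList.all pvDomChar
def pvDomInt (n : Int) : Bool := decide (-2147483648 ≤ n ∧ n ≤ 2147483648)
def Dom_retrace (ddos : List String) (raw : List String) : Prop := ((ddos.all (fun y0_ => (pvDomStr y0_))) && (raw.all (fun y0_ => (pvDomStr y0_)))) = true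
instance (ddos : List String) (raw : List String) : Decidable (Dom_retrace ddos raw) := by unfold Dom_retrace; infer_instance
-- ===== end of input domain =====

-- B precomputes the caret count and builds the output back-to-front over reversed(raw),
-- decrementing an index into ddos, instead of A's 0/1 flag list plus forward interleaving counter.

-- ===== PORT A =====
def retrace (ddos : List String) (raw : List String) : List String :=
  -- fic = []; for i in range(len(raw)): fic.append(1 if "^" in raw[i] else 0)
  let fic : List Int :=
    (PySem.List.pyRange 0 (raw.length : Int) 1).foldl
      (fun acc i =>
        acc ++ [if PySem.Str.isIn "^" (PySem.List.pyGetD raw i "") then (1 : Int) else 0]) []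
  -- lastt = []; h = 0; for i in range(len(fic)): …
  let st :=
    (PySem.List.pyRange 0 (fic.length : Int) 1).foldl
      (fun (st : List String × Int) i =>
        let st1 :=
          if PySem.List.pyGetD fic i 0 == 1 then
            (st.1 ++ [PySem.List.pyGetD ddos st.2 ""], st.2 + 1)   -- ddos[h] (raises outside Pre_)
          else st
        if PySem.List.pyGetD fic i 0 == 0 then
          (st1.1 ++ [PySem.List.pyGetD raw i ""], st1.2)
        else st1)
      ([], 0)
  st.1

-- ===== PORT B =====
def retrace_alt (ddos : List String) (raw : List String) : List String :=
  -- h = sum(1 for x in raw if "^" in x)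
  let h0 : Int := raw.foldl (fun a x => if PySem.Str.isIn "^" x then a + 1 else a) 0
  -- out = []; for x in reversed(raw): if "^" in x: h -= 1; out.append(ddos[h]) else: out.append(x)
  let st :=
    raw.reverse.foldl
      (fun (st : List String × Int) x =>
        if PySem.Str.isIn "^" x then
          (st.1 ++ [PySem.List.pyGetD ddos (st.2 - 1) ""], st.2 - 1)   -- ddos[h] (raises outside Pre_)
        else
          (st.1 ++ [x], st.2))
      ([], h0)
  -- out.reverse(); return out
  st.1.reverse

-- ===== PRECONDITION & SPEC =====
-- Pre_ excludes exactly the inputs where Python A (and Python B alike) raises IndexError: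
-- more caret-containing entries in raw than elements of ddos.
def Pre_retrace (ddos : List String) (raw : List String) : Prop :=
  raw.countP (fun x => PySem.Str.isIn "^" x) ≤ ddos.length
instance (ddos : List String) (raw : List String) : Decidable (Pre_retrace ddos raw) := by
  unfold Pre_retrace; infer_instance

def pvWitness_retrace : List String × List String :=
  (["X^3", "-Y^3"], ["X^2", "+X", "-Y^2"])

def Spec_retrace (ddos : List String) (raw : List String) (out : List String) : Prop := out = retrace_alt ddos raw
instance (ddos : List String) (raw : List String) (out : List String) : Decidable (Spec_retrace ddos raw out) := by unfold Spec_retrace; infer_instance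

-- ===== CLAIM (what is proved, stated in full; the proofs are below) =====
def Claim_equal_retrace : Prop := ∀ (ddos : List String) (raw : List String), Dom_retrace ddos raw → Pre_retrace ddos raw → Spec_retrace ddos raw (retrace ddos raw)

-- ===== LEMMAS AND PROOFS =====

def pvCaret (x : String) : Bool := PySem.Str.isIn "^" x

def pvFlag (x : String) : Int := if pvCaret x then 1 else 0

-- the common reference function: consume one ddos entry per caret element
def pvGo (ddos : List String) (raw : List String) (h : Nat) : List String :=
  match raw with
  | [] => []
  | x :: xs =>
    if pvCaret x then
      PySem.List.pyGetD ddos (h : Int) "" :: pvGo ddos xs (h + 1)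
    else
      x :: pvGo ddos xs h

-- A's second-loop body, as a function of the pair (fic[i], raw[i])
def pvBodyA (ddos : List String) (st : List String × Int) (p : Int × String) : List String × Int :=
  let st1 := if p.1 == 1 then (st.1 ++ [PySem.List.pyGetD ddos st.2 ""], st.2 + 1) else st
  if p.1 == 0 then (st1.1 ++ [p.2], st1.2) else st1

theorem pvRetrace_eq_zip (ddos raw : List String) :
    retrace ddos raw = (((raw.map pvFlag).zip raw).foldl (pvBodyA ddos) ([], 0)).1 := by
  unfold retrace
  dsimp only
  rw [PySem.List.foldl_pyRange_zero_pyGetD' raw ""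
        (fun acc v => acc ++ [if PySem.Str.isIn "^" v then (1 : Int) else 0]) [],
      PySem.List.foldl_append_singleton_eq_map
        (fun v => if PySem.Str.isIn "^" v then (1 : Int) else 0) raw []]
  have hmap : raw.map (fun v => if PySem.Str.isIn "^" v then (1 : Int) else 0) = raw.map pvFlag := by
    simp [pvFlag, pvCaret]
  rw [List.nil_append, hmap]
  have hlen : (raw.map pvFlag).length = ((raw.map pvFlag).zip raw).length := by
    simp
  rw [hlen]
  rw [PySem.List.foldl_congr_mem'
        ((PySem.List.pyRange 0 (((raw.map pvFlag).zip raw).length : Int) 1))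
        _ (fun st j => pvBodyA ddos st (PySem.List.pyGetD ((raw.map pvFlag).zip raw) j ((0 : Int), ""))) ([], 0) ?_]
  · rw [PySem.List.foldl_pyRange_zero_pyGetD' ((raw.map pvFlag).zip raw) ((0 : Int), "") (pvBodyA ddos) ([], 0)]
  · intro i hi st
    obtain ⟨h0, h1⟩ := PySem.List.mem_pyRange_one.mp hi
    have hzl : ((raw.map pvFlag).zip raw).length = raw.length := by simp
    have hiz : i < (((raw.map pvFlag).zip raw).length : Int) := h1
    have hir : i < (raw.length : Int) := by rwa [hzl] at hiz
    have hif : i < ((raw.map pvFlag).length : Int) := by simpa using hir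
    have hz : PySem.List.pyGetD ((raw.map pvFlag).zip raw) i ((0 : Int), "")
        = (PySem.List.pyGetD (raw.map pvFlag) i 0, PySem.List.pyGetD raw i "") := by
      rw [PySem.List.pyGetD_eq_getElem ((raw.map pvFlag).zip raw) ((0 : Int), "") h0 hiz,
          PySem.List.pyGetD_eq_getElem (raw.map pvFlag) 0 h0 hif,
          PySem.List.pyGetD_eq_getElem raw "" h0 hir]
      simp [List.getElem_zip]
    show _ = pvBodyA ddos st (PySem.List.pyGetD ((raw.map pvFlag).zip raw) i ((0 : Int), ""))
    rw [hz]
    simp [pvBodyA]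

theorem pvAloop (ddos : List String) (raw : List String) :
    ∀ (acc : List String) (h : Nat),
      ((raw.map pvFlag).zip raw).foldl (pvBodyA ddos) (acc, (h : Int))
        = (acc ++ pvGo ddos raw h, ((h + raw.countP pvCaret : Nat) : Int)) := by
  induction raw with
  | nil => intro acc h; simp [pvGo]
  | cons x xs ih =>
    intro acc h
    by_cases hc : pvCaret x
    · have hstep : pvBodyA ddos (acc, (h : Int)) (pvFlag x, x)
          = (acc ++ [PySem.List.pyGetD ddos (h : Int) ""], ((h : Int) + 1)) := by
        simp [pvBodyA, pvFlag, hc]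
      simp only [List.map_cons, List.zip_cons_cons, List.foldl_cons, hstep]
      have hcast : ((h : Int) + 1) = (((h + 1 : Nat)) : Int) := by push_cast; ring
      rw [hcast, ih (acc ++ [PySem.List.pyGetD ddos (h : Int) ""]) (h + 1)]
      have hcnt : (x :: xs).countP pvCaret = xs.countP pvCaret + 1 := by
        simp [hc]
      rw [hcnt]
      simp only [Prod.mk.injEq]
      refine ⟨by simp [pvGo, hc], by first | trivial | (push_cast; ring)⟩
    · have hstep : pvBodyA ddos (acc, (h : Int)) (pvFlag x, x) = (acc ++ [x], (h : Int)) := by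
        simp [pvBodyA, pvFlag, hc]
      simp only [List.map_cons, List.zip_cons_cons, List.foldl_cons, hstep]
      rw [ih (acc ++ [x]) h]
      have hcnt : (x :: xs).countP pvCaret = xs.countP pvCaret := by
        simp [hc]
      rw [hcnt]
      simp only [Prod.mk.injEq]
      exact ⟨by simp [pvGo, hc], by trivial⟩

theorem pvA_eq_go (ddos raw : List String) : retrace ddos raw = pvGo ddos raw 0 := by
  rw [pvRetrace_eq_zip]
  have h := pvAloop ddos raw [] 0
  simp only [Nat.cast_zero] at h
  rw [h]
  simp

-- ===== B side =====

-- the generator-sum in B computes the caret count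
theorem pvSum (raw : List String) :
    ∀ c : Int, raw.foldl (fun a x => if PySem.Str.isIn "^" x then a + 1 else a) c
      = c + (raw.countP pvCaret : Int) := by
  induction raw with
  | nil => intro c; simp
  | cons x xs ih =>
    intro c
    by_cases hc : pvCaret x
    · have hc' : PySem.Str.isIn "^" x = true := hc
      simp only [List.foldl_cons, hc', if_true, ih (c + 1), List.countP_cons, hc]
      push_cast; ring
    · have hc' : ¬ PySem.Str.isIn "^" x = true := hc
      simp only [List.foldl_cons, if_neg hc', ih c, List.countP_cons]
      simp [hc]

-- invariant of B's backward loop: it produces pvGo's output reversed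
theorem pvBloop (ddos : List String) (raw : List String) :
    ∀ (acc : List String) (h : Nat),
      raw.reverse.foldl
        (fun (st : List String × Int) x =>
          if PySem.Str.isIn "^" x then
            (st.1 ++ [PySem.List.pyGetD ddos (st.2 - 1) ""], st.2 - 1)
          else
            (st.1 ++ [x], st.2))
        (acc, ((h + raw.countP pvCaret : Nat) : Int))
      = (acc ++ (pvGo ddos raw h).reverse, (h : Int)) := by
  induction raw with
  | nil => intro acc h; simp [pvGo]
  | cons x xs ih =>
    intro acc h
    rw [List.reverse_cons, List.foldl_append]
    by_cases hc : pvCaret x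
    · have hcnt : (x :: xs).countP pvCaret = xs.countP pvCaret + 1 := by simp [hc]
      have hstart : ((h + (x :: xs).countP pvCaret : Nat) : Int)
          = (((h + 1) + xs.countP pvCaret : Nat) : Int) := by rw [hcnt]; push_cast; ring
      rw [hstart, ih acc (h + 1)]
      have hc' : PySem.Str.isIn "^" x = true := hc
      simp only [List.foldl_cons, List.foldl_nil, hc', if_true]
      have hidx : (((h + 1 : Nat) : Int) - 1) = (h : Int) := by push_cast; ring
      rw [hidx]
      simp only [Prod.mk.injEq]
      exact ⟨by simp [pvGo, hc, List.append_assoc], trivial⟩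
    · have hcnt : (x :: xs).countP pvCaret = xs.countP pvCaret := by simp [hc]
      rw [hcnt, ih acc h]
      have hc' : ¬ PySem.Str.isIn "^" x = true := hc
      simp only [List.foldl_cons, List.foldl_nil, if_neg hc']
      simp only [Prod.mk.injEq]
      exact ⟨by simp [pvGo, hc, List.append_assoc], trivial⟩

theorem pvB_eq_go (ddos raw : List String) : retrace_alt ddos raw = pvGo ddos raw 0 := by
  unfold retrace_alt
  dsimp only
  rw [pvSum raw 0]
  have h0 : (0 : Int) + (raw.countP pvCaret : Int) = ((0 + raw.countP pvCaret : Nat) : Int) := by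
    push_cast; ring
  rw [h0, pvBloop ddos raw [] 0]
  simp

-- ===== VERDICT (by name: the statement is the Claim_ definition above) =====
theorem retrace_spec : Claim_equal_retrace := by
  intro ddos raw _ _
  unfold Spec_retrace
  rw [pvA_eq_go, pvB_eq_go]
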